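-- pv_equiv track=rewrite | github.com/gimdongwon/Catch_python_tmi | Woojin/07th/population-migration/solution.py | bfs
-- ===== SOURCE A (Python) =====
-- from collections import deque
-- from collections import deque
--
-- def bfs(n, l, r, population, visited):
--     check_group = False
--
--     for i in range(n):
--         for j in range(n):
--             if not visited[i][j]:
--                 queue = deque([(i, j)]) # 초기화
--                 visited[i][j] = True
--                 dirs = [(1, 0), (-1, 0), (0, 1), (0, -1)]
--                 union = [(i, j, population[i][j])]
--
--                 while queue:
--                     x, y = queue.popleft()
--
--                     for dx, dy in dirs:
--                         nx, ny = x + dx, y + dy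
--
--                         if not (0 <= nx < n and 0 <= ny < n):
--                             continue
--
--                         if visited[nx][ny]:
--                             continue
--
--                         if not l <= abs(population[nx][ny] - population[x][y]) <= r:
--                             continue
--
--                         visited[nx][ny] = True
--                         queue.append((nx, ny))
--                         union.append((nx, ny, population[nx][ny]))
--
--                 if len(union) >= 2:
--                     check_group = True
--                     popn_mean = sum(r[2] for r in union) // len(union)
--
--                     for x, y, _ in union:
--                         population[x][y] = popn_mean
--
--     if check_group:
--         return 1
--     else:
--         return 0
-- ===== SOURCE B (Python) =====
-- def bfs(n, l, r, population, visited):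
--     # Return-value-only reimplementation: A returns 1 iff some pair of adjacent
--     # in-grid cells, both initially unvisited, has population difference d with
--     # l <= |d| <= r (such a pair starts a merge group of size >= 2).
--     # Unlike A, this function does not mutate `population` or `visited`.
--     found = any(
--         not visited[i][j] and not visited[x][y]
--         and l <= abs(population[i][j] - population[x][y]) <= r
--         for i in range(n)
--         for j in range(n)
--         for x, y in ((i + 1, j), (i, j + 1))
--         if x < n and y < n
--     )
--     return 1 if found else 0
-- ===== Notes on version B (the rewrite author's own statement) =====
-- stated objective: simpler
-- what changed: A's BFS flood-fill with queue, union collection and in-place group averaging is replaced by a single scan that returns 1 iff some pair of adjacent in-grid cells, both initially unvisited, has absolute population difference within [l, r] (exactly the pairs that start a merge group of size >= 2); B does not mutate population/visited, so the equivalence is about the return value only.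
import Mathlib
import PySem

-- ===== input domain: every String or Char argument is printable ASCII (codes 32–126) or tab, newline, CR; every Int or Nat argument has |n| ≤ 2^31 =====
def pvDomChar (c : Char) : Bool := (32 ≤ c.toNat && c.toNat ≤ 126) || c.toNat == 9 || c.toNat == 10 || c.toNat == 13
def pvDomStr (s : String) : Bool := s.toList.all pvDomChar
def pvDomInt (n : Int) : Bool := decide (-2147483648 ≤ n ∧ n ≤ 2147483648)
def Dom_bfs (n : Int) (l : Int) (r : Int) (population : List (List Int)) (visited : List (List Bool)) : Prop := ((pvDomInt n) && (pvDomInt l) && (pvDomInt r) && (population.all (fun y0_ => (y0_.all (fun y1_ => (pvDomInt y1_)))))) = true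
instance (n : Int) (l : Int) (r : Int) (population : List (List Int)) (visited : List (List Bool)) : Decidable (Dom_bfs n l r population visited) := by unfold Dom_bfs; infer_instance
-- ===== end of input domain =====

-- B replaces A's BFS flood-fill-and-average by a single scan for one adjacent pair of
-- initially-unvisited cells whose |population difference| lies in [l, r] (simpler, same
-- return value).  A mutates `population`/`visited` in place and B does not: the
-- equivalence proved here is about the RETURN value only.

-- ===== PORT A =====
-- grid read g[x][y]; the default d is returned only out of range, where Python raises —
-- every read A makes is in range under Pre_bfs and A's own `0 <= nx < n` guards.
def gget {α : Type} (d : α) (g : List (List α)) (x y : Int) : α :=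
  (PySem.List.pyGet? ((PySem.List.pyGet? g x).getD []) y).getD d

-- grid write g[x][y] = a (pySetD is a no-op out of range, where Python raises; in range here)
def gset {α : Type} (g : List (List α)) (x y : Int) (a : α) : List (List α) :=
  PySem.List.pySetD g x (PySem.List.pySetD ((PySem.List.pyGet? g x).getD []) y a)

-- dirs = [(1, 0), (-1, 0), (0, 1), (0, -1)]
def dirsL : List (Int × Int) := [(1, 0), (-1, 0), (0, 1), (0, -1)]

-- number of `false` entries of the visited grid (termination measure only)
def cfRow (row : List Bool) : Nat := row.countP (fun b => b = false)
def cf (v : List (List Bool)) : Nat := (v.map cfRow).sum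

-- the `for dx, dy in dirs:` body: state = (visited, appended queue entries, union)
def scanDirs (n l r : Int) (p : List (List Int)) (x y : Int) :
    List (Int × Int) → List (List Bool) → List (Int × Int) → List (Int × Int × Int) →
    List (List Bool) × List (Int × Int) × List (Int × Int × Int)
  | [], v, app, u => (v, app, u)
  | (dx, dy) :: ds, v, app, u =>
      let nx := x + dx
      let ny := y + dy
      if ¬(0 ≤ nx ∧ nx < n ∧ 0 ≤ ny ∧ ny < n) then
        scanDirs n l r p x y ds v app u
      else if gget true v nx ny then
        scanDirs n l r p x y ds v app u
      else if ¬(l ≤ |gget 0 p nx ny - gget 0 p x y| ∧ |gget 0 p nx ny - gget 0 p x y| ≤ r) then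
        scanDirs n l r p x y ds v app u
      else
        scanDirs n l r p x y ds (gset v nx ny true) (app ++ [(nx, ny)])
          (u ++ [(nx, ny, gget 0 p nx ny)])

-- ---- facts the termination measure of `bfsLoop` needs ----

theorem pySetD_nonneg {α : Type} (xs : List α) (i : Int) (v : α) (h0 : 0 ≤ i) :
    PySem.List.pySetD xs i v = xs.set i.toNat v := by
  unfold PySem.List.pySetD PySem.List.pySet? PySem.List.pyIdx?
  split_ifs with h1 h2
  · simp
  · simp
    exact (List.set_eq_of_length_le (by omega)).symm

theorem gget_eq_getD {α : Type} (d : α) (g : List (List α)) (x y : Int)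
    (hx : 0 ≤ x) (hy : 0 ≤ y) :
    gget d g x y = ((g.getD x.toNat []).getD y.toNat d) := by
  unfold gget
  rw [PySem.List.pyGet?_of_nonneg _ hx, PySem.List.pyGet?_of_nonneg _ hy]
  simp [List.getD_eq_getElem?_getD]

theorem gset_eq_set {α : Type} (g : List (List α)) (x y : Int) (a : α)
    (hx : 0 ≤ x) (hy : 0 ≤ y) :
    gset g x y a = g.set x.toNat ((g.getD x.toNat []).set y.toNat a) := by
  unfold gset
  rw [PySem.List.pyGet?_of_nonneg _ hx, pySetD_nonneg _ _ _ hy, pySetD_nonneg _ _ _ hx]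
  simp [List.getD_eq_getElem?_getD]

theorem cfRow_set_true_lt (row : List Bool) (m : Nat) (h : row[m]? = some false) :
    cfRow (row.set m true) < cfRow row := by
  induction row generalizing m with
  | nil => simp at h
  | cons b bs ih =>
    cases m with
    | zero =>
      simp at h
      subst h
      simp [cfRow, List.countP_cons]
    | succ m =>
      simp at h
      have := ih m h
      cases b <;> simp [cfRow, List.countP_cons] at this ⊢ <;> omega

theorem cf_set_lt (v : List (List Bool)) (k : Nat) (row' : List Bool)
    (hk : k < v.length) (h : cfRow row' < cfRow (v.getD k [])) : cf (v.set k row') < cf v := by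
  induction v generalizing k with
  | nil => simp at hk
  | cons row rows ih =>
    cases k with
    | zero =>
      simp [cf, List.getD] at h ⊢
      omega
    | succ k =>
      simp at hk
      simp [List.getD] at h
      have := ih k hk (by simpa [List.getD] using h)
      simp [cf] at this ⊢
      omega

theorem cf_gset_true_lt (v : List (List Bool)) (x y : Int) (hx : 0 ≤ x) (hy : 0 ≤ y)
    (h : gget true v x y = false) : cf (gset v x y true) < cf v := by
  rw [gget_eq_getD _ _ _ _ hx hy] at h
  rw [gset_eq_set _ _ _ _ hx hy]
  have hrow : (v.getD x.toNat [])[y.toNat]? = some false := by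
    rw [List.getD_eq_getElem?_getD] at h
    cases hc : (v.getD x.toNat [])[y.toNat]? with
    | none => rw [hc] at h; simp at h
    | some b => rw [hc] at h; simp at h; rw [h]
  have hk : x.toNat < v.length := by
    by_contra hge
    have : v.getD x.toNat [] = [] := by
      rw [List.getD_eq_getElem?_getD, List.getElem?_eq_none (by omega)]
      rfl
    rw [this] at hrow
    simp at hrow
  exact cf_set_lt v x.toNat _ hk (cfRow_set_true_lt _ _ hrow)
theorem cf_scanDirs (n l r : Int) (p : List (List Int)) (x y : Int)
    (ds : List (Int × Int)) (v : List (List Bool)) (app : List (Int × Int))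
    (u : List (Int × Int × Int)) :
    cf (scanDirs n l r p x y ds v app u).1 + ((scanDirs n l r p x y ds v app u).2.1).length
      ≤ cf v + app.length := by
  induction ds generalizing v app u with
  | nil => simp [scanDirs]
  | cons d ds ih =>
    obtain ⟨dx, dy⟩ := d
    simp only [scanDirs]
    split_ifs with h1 h2 h3 <;> try exact ih v app u
    · have hlt := cf_gset_true_lt v (x + dx) (y + dy) h1.1 h1.2.2.1
        (Bool.eq_false_iff.mpr h2)
      have := ih (gset v (x + dx) (y + dy) true) (app ++ [(x + dx, y + dy)])
        (u ++ [(x + dx, y + dy, gget 0 p (x + dx) (y + dy))])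
      simp only [List.length_append, List.length_cons, List.length_nil] at this ⊢
      omega

-- the `while queue:` loop; arguments = (queue, visited, union)
def bfsLoop (n l r : Int) (p : List (List Int)) :
    List (Int × Int) → List (List Bool) → List (Int × Int × Int) →
    List (List Bool) × List (Int × Int × Int)
  | [], v, u => (v, u)
  | (x, y) :: rest, v, u =>
      let t := scanDirs n l r p x y dirsL v [] u
      bfsLoop n l r p (rest ++ t.2.1) t.1 t.2.2
  termination_by q v _ => 5 * cf v + q.length
  decreasing_by
    have h := cf_scanDirs n l r p x y dirsL v [] u
    simp only [List.length_append, List.length_cons, List.length_nil, Nat.add_zero] at *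
    set s := scanDirs n l r p x y dirsL v [] u with hs
    omega

-- the body of the nested `for i / for j` loops; state = (visited, population, check_group)
def processCell (n l r : Int)
    (st : List (List Bool) × List (List Int) × Bool) (i j : Int) :
    List (List Bool) × List (List Int) × Bool :=
  if gget true st.1 i j then st
  else
    let p := st.2.1
    let t := bfsLoop n l r p [(i, j)] (gset st.1 i j true) [(i, j, gget 0 p i j)]
    if 2 ≤ t.2.length then
      let m := PySem.Int.floordiv (t.2.foldl (fun a e => a + e.2.2) 0) (t.2.length : Int)
      (t.1, t.2.foldl (fun pp e => gset pp e.1 e.2.1 m) p, true)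
    else
      (t.1, p, st.2.2)

def bfs (n : Int) (l : Int) (r : Int) (population : List (List Int)) (visited : List (List Bool)) : Int :=
  let st := (PySem.List.pyRange 0 n 1).foldl
    (fun st i => (PySem.List.pyRange 0 n 1).foldl (fun st2 j => processCell n l r st2 i j) st)
    (visited, population, false)
  if st.2.2 then 1 else 0

-- ===== PORT B =====
def bfs_alt (n : Int) (l : Int) (r : Int) (population : List (List Int)) (visited : List (List Bool)) : Int :=
  let found := (PySem.List.pyRange 0 n 1).any fun i =>
    (PySem.List.pyRange 0 n 1).any fun j =>
      (([((i + 1 : Int), j), (i, (j + 1 : Int))].filter fun c => decide (c.1 < n ∧ c.2 < n)).any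
        fun c =>
          !gget true visited i j && !gget true visited c.1 c.2 &&
            decide (l ≤ |gget 0 population i j - gget 0 population c.1 c.2| ∧
              |gget 0 population i j - gget 0 population c.1 c.2| ≤ r))
  if found then 1 else 0

-- ===== PRECONDITION & SPEC =====
-- Pre_bfs: the first n rows of both grids exist and have at least n entries — exactly
-- the cells A indexes; on anything less A raises IndexError (trivially true for n ≤ 0).
def Pre_bfs (n : Int) (l : Int) (r : Int) (population : List (List Int)) (visited : List (List Bool)) : Prop :=
  n ≤ (population.length : Int) ∧ (∀ row ∈ population.take n.toNat, n ≤ (row.length : Int)) ∧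
  n ≤ (visited.length : Int) ∧ (∀ row ∈ visited.take n.toNat, n ≤ (row.length : Int))
instance (n : Int) (l : Int) (r : Int) (population : List (List Int)) (visited : List (List Bool)) : Decidable (Pre_bfs n l r population visited) := by unfold Pre_bfs; infer_instance

def pvWitness_bfs : Int × Int × Int × List (List Int) × List (List Bool) :=
  (2, 1, 3, [[1, 2], [9, 4]], [[false, false], [false, false]])

def Spec_bfs (n : Int) (l : Int) (r : Int) (population : List (List Int)) (visited : List (List Bool)) (out : Int) : Prop := out = bfs_alt n l r population visited
instance (n : Int) (l : Int) (r : Int) (population : List (List Int)) (visited : List (List Bool)) (out : Int) : Decidable (Spec_bfs n l r population visited out) := by unfold Spec_bfs; infer_instance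

-- ===== CLAIM (what is proved, stated in full; the proofs are below) =====
def Claim_equal_bfs : Prop := ∀ (n : Int) (l : Int) (r : Int) (population : List (List Int)) (visited : List (List Bool)), Dom_bfs n l r population visited → Pre_bfs n l r population visited → Spec_bfs n l r population visited (bfs n l r population visited)

-- ===== LEMMAS AND PROOFS =====

-- in-grid cells
def inG (n : Int) (c : Int × Int) : Prop := 0 ≤ c.1 ∧ c.1 < n ∧ 0 ≤ c.2 ∧ c.2 < n

-- shape: the first n rows exist and have length ≥ n
def Sh {α : Type} (n : Int) (g : List (List α)) : Prop :=
  n ≤ (g.length : Int) ∧ ∀ k : Nat, (k : Int) < n → n ≤ ((g.getD k []).length : Int)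

-- an edge A would merge along: adjacent in-grid cells, both initially unvisited,
-- original population difference within [l, r]
def Ed (n l r : Int) (p0 : List (List Int)) (v0 : List (List Bool)) (a b : Int × Int) : Prop :=
  inG n a ∧ inG n b ∧ (b.1 - a.1, b.2 - a.2) ∈ dirsL ∧
  gget true v0 a.1 a.2 = false ∧ gget true v0 b.1 b.2 = false ∧
  l ≤ |gget 0 p0 b.1 b.2 - gget 0 p0 a.1 a.2| ∧ |gget 0 p0 b.1 b.2 - gget 0 p0 a.1 a.2| ≤ r

def EX (n l r : Int) (p0 : List (List Int)) (v0 : List (List Bool)) : Prop :=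
  ∃ a b, Ed n l r p0 v0 a b

-- ---- basic pySetD / gget / gset facts ----

theorem length_gset {α : Type} (g : List (List α)) (x y : Int) (a : α) (hx : 0 ≤ x) (hy : 0 ≤ y) :
    (gset g x y a).length = g.length := by
  rw [gset_eq_set _ _ _ _ hx hy, List.length_set]

theorem getD_gset_row {α : Type} (g : List (List α)) (x y : Int) (a : α) (hx : 0 ≤ x) (hy : 0 ≤ y)
    (k : Nat) : ((gset g x y a).getD k []).length = (g.getD k []).length := by
  rw [gset_eq_set _ _ _ _ hx hy]
  simp only [List.getD_eq_getElem?_getD, List.getElem?_set]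
  split_ifs with h1 h2
  · subst h1
    simp [h2, List.getD_eq_getElem?_getD]
  · subst h1
    simp at h2
    simp [List.getElem?_eq_none (by omega : g.length ≤ x.toNat)]
  · rfl

theorem Sh_gset {α : Type} (n : Int) (g : List (List α)) (x y : Int) (a : α)
    (hx : 0 ≤ x) (hy : 0 ≤ y) (h : Sh n g) : Sh n (gset g x y a) := by
  refine ⟨?_, ?_⟩
  · rw [length_gset _ _ _ _ hx hy]; exact h.1
  · intro k hk
    rw [getD_gset_row _ _ _ _ hx hy]
    exact h.2 k hk

theorem gget_gset_same {α : Type} (d : α) (g : List (List α)) (x y : Int) (a : α)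
    (hx : 0 ≤ x) (hy : 0 ≤ y) (hxl : x.toNat < g.length) (hyl : y.toNat < (g.getD x.toNat []).length) :
    gget d (gset g x y a) x y = a := by
  rw [gget_eq_getD _ _ _ _ hx hy, gset_eq_set _ _ _ _ hx hy]
  rw [List.getD_eq_getElem?_getD] at hyl
  simp only [List.getD_eq_getElem?_getD, List.getElem?_set, if_pos rfl, if_pos hxl]
  simp [List.getElem?_set, hyl]

theorem gget_gset_ne {α : Type} (d : α) (g : List (List α)) (x y x' y' : Int) (a : α)
    (hx : 0 ≤ x) (hy : 0 ≤ y) (hx' : 0 ≤ x') (hy' : 0 ≤ y')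
    (hne : ¬(x' = x ∧ y' = y)) :
    gget d (gset g x y a) x' y' = gget d g x' y' := by
  rw [gget_eq_getD _ _ _ _ hx' hy', gget_eq_getD _ _ _ _ hx' hy', gset_eq_set _ _ _ _ hx hy]
  by_cases hxx : x.toNat = x'.toNat
  · have hxeq : x' = x := by omega
    have hyne : y' ≠ y := fun h => hne ⟨hxeq, h⟩
    subst hxeq
    simp only [List.getD_eq_getElem?_getD, List.getElem?_set, if_pos rfl]
    by_cases h : x'.toNat < g.length
    · rw [if_pos h]
      simp only [if_true, Option.getD_some]
      rw [List.getElem?_set, if_neg (show ¬ y.toNat = y'.toNat by omega)]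
    · rw [if_neg h, List.getElem?_eq_none (show g.length ≤ x'.toNat by omega)]
      simp
  · simp only [List.getD_eq_getElem?_getD, List.getElem?_set, if_neg hxx]
theorem inG_range {α : Type} (n : Int) (g : List (List α)) (c : Int × Int)
    (hs : Sh n g) (hc : inG n c) :
    c.1.toNat < g.length ∧ c.2.toNat < (g.getD c.1.toNat []).length := by
  obtain ⟨h1, h2, h3, h4⟩ := hc
  obtain ⟨hl, hr⟩ := hs
  have := hr c.1.toNat (by omega)
  omega

theorem gget_gset_same' {α : Type} (d : α) (n : Int) (g : List (List α)) (c : Int × Int) (a : α)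
    (hs : Sh n g) (hc : inG n c) : gget d (gset g c.1 c.2 a) c.1 c.2 = a := by
  obtain ⟨hx, hy⟩ := inG_range n g c hs hc
  exact gget_gset_same d g c.1 c.2 a hc.1 hc.2.2.1 hx hy

-- an edge is symmetric
theorem Ed_symm (n l r : Int) (p0 : List (List Int)) (v0 : List (List Bool)) (a b : Int × Int)
    (h : Ed n l r p0 v0 a b) : Ed n l r p0 v0 b a := by
  obtain ⟨h1, h2, h3, h4, h5, h6, h7⟩ := h
  refine ⟨h2, h1, ?_, h5, h4, by rw [abs_sub_comm]; exact h6, by rw [abs_sub_comm]; exact h7⟩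
  simp only [dirsL, List.mem_cons, List.not_mem_nil, or_false, Prod.ext_iff] at h3 ⊢
  omega

-- membership in pyRange 0 n 1
theorem mem_pyRange01 (n i : Int) : i ∈ PySem.List.pyRange 0 n 1 ↔ 0 ≤ i ∧ i < n := by
  rw [PySem.List.mem_pyRange_one]

-- ---- scanDirs: one master lemma ----

theorem scanDirs_master (n l r : Int) (p p0 : List (List Int)) (v0 : List (List Bool))
    (x y : Int)
    (ds : List (Int × Int)) (v : List (List Bool)) (app : List (Int × Int))
    (u : List (Int × Int × Int))
    (hds : ∀ d ∈ ds, d ∈ dirsL)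
    (hSh : Sh n v)
    (hmono0 : ∀ c : Int × Int, inG n c → gget true v0 c.1 c.2 = true → gget true v c.1 c.2 = true)
    (hagree : ∀ c : Int × Int, inG n c → gget true v c.1 c.2 = false → gget 0 p c.1 c.2 = gget 0 p0 c.1 c.2)
    (hx : inG n (x, y))
    (hx0 : gget true v0 x y = false)
    (hxp : gget 0 p x y = gget 0 p0 x y) :
    Sh n (scanDirs n l r p x y ds v app u).1 ∧
    (∀ a b : Int, 0 ≤ a → 0 ≤ b → gget true v a b = true →
        gget true (scanDirs n l r p x y ds v app u).1 a b = true) ∧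
    (∃ w : List (Int × Int),
      (scanDirs n l r p x y ds v app u).2.1 = app ++ w ∧
      (scanDirs n l r p x y ds v app u).2.2 = u ++ w.map (fun c => (c.1, c.2, gget 0 p c.1 c.2)) ∧
      (∀ c ∈ w, inG n c ∧ gget true v c.1 c.2 = false ∧
        gget true (scanDirs n l r p x y ds v app u).1 c.1 c.2 = true ∧
        Ed n l r p0 v0 (x, y) c) ∧
      (w = [] → (scanDirs n l r p x y ds v app u).1 = v ∧
        ∀ d ∈ ds, ¬ inG n (x + d.1, y + d.2) ∨ gget true v (x + d.1) (y + d.2) = true ∨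
          ¬(l ≤ |gget 0 p (x + d.1) (y + d.2) - gget 0 p x y| ∧
            |gget 0 p (x + d.1) (y + d.2) - gget 0 p x y| ≤ r))) := by
  induction ds generalizing v app u with
  | nil =>
    refine ⟨hSh, fun a b _ _ h => h, [], by simp [scanDirs], by simp [scanDirs], by simp,
      fun _ => ⟨rfl, by simp⟩⟩
  | cons d ds ih =>
    obtain ⟨dx, dy⟩ := d
    have hds' : ∀ d ∈ ds, d ∈ dirsL := fun e he => hds e (List.mem_cons_of_mem _ he)
    simp only [scanDirs]
    split_ifs with h1 h2 h3
    all_goals try {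
      obtain ⟨C1, C2, w, hw1, hw2, hw3, hw4⟩ := ih v app u hds' hSh hmono0 hagree
      refine ⟨C1, C2, w, hw1, hw2, hw3, fun hwnil => ?_⟩
      obtain ⟨hv, hsk⟩ := hw4 hwnil
      refine ⟨hv, fun e he => ?_⟩
      rcases List.mem_cons.mp he with heq | hmem
      · subst heq
        first
          | exact Or.inl (by simpa [inG] using h1)
          | exact Or.inr (Or.inl (by simpa using h2))
          | exact Or.inr (Or.inr (by simpa using h3))
      · exact hsk e hmem }
    · have hnx0 : (0:Int) ≤ x + dx := h1.1
      have hny0 : (0:Int) ≤ y + dy := h1.2.2.1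
      have hinGb : inG n (x + dx, y + dy) := ⟨h1.1, h1.2.1, h1.2.2.1, h1.2.2.2⟩
      have hvfalse : gget true v (x + dx) (y + dy) = false := Bool.eq_false_iff.mpr h2
      set v' := gset v (x + dx) (y + dy) true with hv'
      have hSh' : Sh n v' := Sh_gset n v _ _ true hnx0 hny0 hSh
      have hsame : gget true v' (x + dx) (y + dy) = true :=
        gget_gset_same' true n v (x + dx, y + dy) true hSh hinGb
      have hne : ∀ a b : Int, 0 ≤ a → 0 ≤ b → ¬(a = x + dx ∧ b = y + dy) →
          gget true v' a b = gget true v a b := fun a b ha hb hab =>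
        gget_gset_ne true v (x + dx) (y + dy) a b true hnx0 hny0 ha hb hab
      have hmono1 : ∀ a b : Int, 0 ≤ a → 0 ≤ b → gget true v a b = true →
          gget true v' a b = true := by
        intro a b ha hb h
        by_cases hc : a = x + dx ∧ b = y + dy
        · obtain ⟨rfl, rfl⟩ := hc; exact hsame
        · rw [hne a b ha hb hc]; exact h
      have hmono0' : ∀ c : Int × Int, inG n c → gget true v0 c.1 c.2 = true →
          gget true v' c.1 c.2 = true :=
        fun c hc h => hmono1 c.1 c.2 hc.1 hc.2.2.1 (hmono0 c hc h)
      have hdown : ∀ a b : Int, 0 ≤ a → 0 ≤ b → gget true v' a b = false →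
          gget true v a b = false := by
        intro a b ha hb h
        by_cases hc : a = x + dx ∧ b = y + dy
        · obtain ⟨rfl, rfl⟩ := hc; rw [hsame] at h; exact absurd h (by simp)
        · rw [hne a b ha hb hc] at h; exact h
      have hagree' : ∀ c : Int × Int, inG n c → gget true v' c.1 c.2 = false →
          gget 0 p c.1 c.2 = gget 0 p0 c.1 c.2 :=
        fun c hc h => hagree c hc (hdown c.1 c.2 hc.1 hc.2.2.1 h)
      have hb0 : gget true v0 (x + dx) (y + dy) = false := by
        cases hb : gget true v0 (x + dx) (y + dy)
        · rfl
        · have := hmono0 (x + dx, y + dy) hinGb hb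
          simp only at this
          rw [hvfalse] at this
          exact absurd this (by simp)
      have hbp : gget 0 p (x + dx) (y + dy) = gget 0 p0 (x + dx) (y + dy) :=
        hagree (x + dx, y + dy) hinGb hvfalse
      have hEd : Ed n l r p0 v0 (x, y) (x + dx, y + dy) := by
        refine ⟨hx, hinGb, ?_, hx0, hb0, ?_, ?_⟩
        · simp only
          have heq : (x + dx - x, y + dy - y) = (dx, dy) := by
            refine Prod.ext ?_ ?_ <;> simp
          rw [heq]
          exact hds (dx, dy) List.mem_cons_self
        · rw [← hbp, ← hxp]; exact h3.1
        · rw [← hbp, ← hxp]; exact h3.2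
      obtain ⟨C1, C2, w, hw1, hw2, hw3, _⟩ :=
        ih v' (app ++ [(x + dx, y + dy)]) (u ++ [(x + dx, y + dy, gget 0 p (x + dx) (y + dy))])
          hds' hSh' hmono0' hagree'
      refine ⟨C1, fun a b ha hb h => C2 a b ha hb (hmono1 a b ha hb h), (x + dx, y + dy) :: w,
        by rw [hw1, List.append_assoc]; rfl, by rw [hw2, List.append_assoc]; rfl, ?_,
        fun hwnil => absurd hwnil (by simp)⟩
      intro c hc
      rcases List.mem_cons.mp hc with rfl | hmem
      · exact ⟨hinGb, hvfalse, C2 _ _ hnx0 hny0 hsame, hEd⟩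
      · obtain ⟨m1, m2, m3, m4⟩ := hw3 c hmem
        exact ⟨m1, hdown c.1 c.2 m1.1 m1.2.2.1 m2, m3, m4⟩

-- union entries A collects: in grid, initially unvisited, currently visited,
-- carrying the original population
def UG (n : Int) (p p0 : List (List Int)) (v0 v : List (List Bool)) (e : Int × Int × Int) : Prop :=
  inG n (e.1, e.2.1) ∧ gget true v0 e.1 e.2.1 = false ∧
  gget 0 p e.1 e.2.1 = gget 0 p0 e.1 e.2.1 ∧ e.2.2 = gget 0 p0 e.1 e.2.1 ∧
  gget true v e.1 e.2.1 = true

-- ---- bfsLoop: preservation ----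

theorem bfsLoop_master (n l r : Int) (p p0 : List (List Int)) (v0 : List (List Bool))
    (q : List (Int × Int)) (v : List (List Bool)) (u : List (Int × Int × Int))
    (hSh : Sh n v)
    (hmono0 : ∀ c : Int × Int, inG n c → gget true v0 c.1 c.2 = true → gget true v c.1 c.2 = true)
    (hagree : ∀ c : Int × Int, inG n c → gget true v c.1 c.2 = false → gget 0 p c.1 c.2 = gget 0 p0 c.1 c.2)
    (hu : ∀ e ∈ u, UG n p p0 v0 v e)
    (hq : ∀ c ∈ q, ∃ pv, (c.1, c.2, pv) ∈ u)
    (hlen : 2 ≤ u.length → EX n l r p0 v0) :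
    Sh n (bfsLoop n l r p q v u).1 ∧
    (∀ a b : Int, 0 ≤ a → 0 ≤ b → gget true v a b = true →
        gget true (bfsLoop n l r p q v u).1 a b = true) ∧
    (∃ w, (bfsLoop n l r p q v u).2 = u ++ w) ∧
    (∀ e ∈ (bfsLoop n l r p q v u).2, UG n p p0 v0 (bfsLoop n l r p q v u).1 e) ∧
    (∀ c : Int × Int, inG n c → gget true (bfsLoop n l r p q v u).1 c.1 c.2 = false →
        gget 0 p c.1 c.2 = gget 0 p0 c.1 c.2) ∧
    (2 ≤ (bfsLoop n l r p q v u).2.length → EX n l r p0 v0) := by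
  revert hSh hmono0 hagree hu hq hlen
  induction q, v, u using bfsLoop.induct n l r p with
  | case1 v u =>
    intro hSh hmono0 hagree hu hq hlen
    simp only [bfsLoop]
    exact ⟨hSh, fun a b _ _ h => h, ⟨[], by simp⟩, hu, hagree, hlen⟩
  | case2 x y rest v u tt ih =>
    intro hSh hmono0 hagree hu hq hlen
    rw [show tt = scanDirs n l r p x y dirsL v [] u from rfl] at ih
    simp only [bfsLoop]
    obtain ⟨pv, hpv⟩ := hq (x, y) List.mem_cons_self
    have hug := hu _ hpv
    obtain ⟨hxin, hx0, hxp, _, _⟩ := hug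
    have hsm := scanDirs_master n l r p p0 v0 x y dirsL v [] u (fun d hd => hd)
      hSh hmono0 hagree hxin hx0 hxp
    obtain ⟨C1, C2, w, hw1, hw2, hw3, _⟩ := hsm
    set t := scanDirs n l r p x y dirsL v [] u with ht
    have hdown : ∀ a b : Int, 0 ≤ a → 0 ≤ b → gget true t.1 a b = false →
        gget true v a b = false := by
      intro a b ha hb h
      cases hv : gget true v a b
      · rfl
      · rw [C2 a b ha hb hv] at h; exact absurd h (by simp)
    have hmono0' : ∀ c : Int × Int, inG n c → gget true v0 c.1 c.2 = true →
        gget true t.1 c.1 c.2 = true :=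
      fun c hc h => C2 c.1 c.2 hc.1 hc.2.2.1 (hmono0 c hc h)
    have hagree' : ∀ c : Int × Int, inG n c → gget true t.1 c.1 c.2 = false →
        gget 0 p c.1 c.2 = gget 0 p0 c.1 c.2 :=
      fun c hc h => hagree c hc (hdown c.1 c.2 hc.1 hc.2.2.1 h)
    have hu' : ∀ e ∈ t.2.2, UG n p p0 v0 t.1 e := by
      intro e he
      rw [hw2] at he
      rcases List.mem_append.mp he with hold | hnew
      · obtain ⟨g1, g2, g3, g4, g5⟩ := hu e hold
        exact ⟨g1, g2, g3, g4, C2 e.1 e.2.1 g1.1 g1.2.2.1 g5⟩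
      · obtain ⟨c, hcw, hce⟩ := List.mem_map.mp hnew
        obtain ⟨m1, m2, m3, hEd⟩ := hw3 c hcw
        subst hce
        exact ⟨m1, hEd.2.2.2.2.1, hagree c m1 m2, hagree c m1 m2, m3⟩
    have hq' : ∀ c ∈ rest ++ t.2.1, ∃ pv, (c.1, c.2, pv) ∈ t.2.2 := by
      intro c hc
      rcases List.mem_append.mp hc with hr | ha
      · obtain ⟨pv', hpv'⟩ := hq c (List.mem_cons_of_mem _ hr)
        exact ⟨pv', by rw [hw2]; exact List.mem_append_left _ hpv'⟩
      · rw [hw1] at ha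
        simp only [List.nil_append] at ha
        exact ⟨gget 0 p c.1 c.2, by
          rw [hw2]
          exact List.mem_append_right _ (List.mem_map.mpr ⟨c, ha, rfl⟩)⟩
    have hlen' : 2 ≤ t.2.2.length → EX n l r p0 v0 := by
      intro hL
      cases w with
      | nil => rw [hw2] at hL; simp at hL; exact hlen (by omega)
      | cons c cs =>
        obtain ⟨m1, m2, m3, hEd⟩ := hw3 c List.mem_cons_self
        exact ⟨(x, y), c, hEd⟩
    obtain ⟨D1, D2, ⟨w2, hw2'⟩, D4, D5, D6⟩ := ih C1 hmono0' hagree' hu' hq' hlen'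
    refine ⟨D1, fun a b ha hb h => D2 a b ha hb (C2 a b ha hb h), ?_, D4, D5, D6⟩
    refine ⟨w.map (fun c => (c.1, c.2, gget 0 p c.1 c.2)) ++ w2, ?_⟩
    rw [hw2', hw2, List.append_assoc]

-- the singleton run: if the union did not grow, the start cell had no mergeable neighbour
theorem scanDirs_basic (n l r : Int) (p : List (List Int)) (x y : Int)
    (ds : List (Int × Int)) (v : List (List Bool)) (app : List (Int × Int))
    (u : List (Int × Int × Int)) :
    ∃ w : List (Int × Int),
      (scanDirs n l r p x y ds v app u).2.1 = app ++ w ∧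
      (scanDirs n l r p x y ds v app u).2.2 = u ++ w.map (fun c => (c.1, c.2, gget 0 p c.1 c.2)) ∧
      (w = [] → (scanDirs n l r p x y ds v app u).1 = v ∧
        ∀ d ∈ ds, ¬ inG n (x + d.1, y + d.2) ∨ gget true v (x + d.1) (y + d.2) = true ∨
          ¬(l ≤ |gget 0 p (x + d.1) (y + d.2) - gget 0 p x y| ∧
            |gget 0 p (x + d.1) (y + d.2) - gget 0 p x y| ≤ r)) := by
  induction ds generalizing v app u with
  | nil => exact ⟨[], by simp [scanDirs], by simp [scanDirs], fun _ => ⟨rfl, by simp⟩⟩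
  | cons d ds ih =>
    obtain ⟨dx, dy⟩ := d
    simp only [scanDirs]
    split_ifs with h1 h2 h3
    all_goals try {
      obtain ⟨w, hw1, hw2, hw4⟩ := ih v app u
      refine ⟨w, hw1, hw2, fun hwnil => ?_⟩
      obtain ⟨hv, hsk⟩ := hw4 hwnil
      refine ⟨hv, fun e he => ?_⟩
      rcases List.mem_cons.mp he with heq | hmem
      · subst heq
        first
          | exact Or.inl (by simpa [inG] using h1)
          | exact Or.inr (Or.inl (by simpa using h2))
          | exact Or.inr (Or.inr (by simpa using h3))
      · exact hsk e hmem }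
    · obtain ⟨w, hw1, hw2, _⟩ := ih (gset v (x + dx) (y + dy) true) (app ++ [(x + dx, y + dy)])
        (u ++ [(x + dx, y + dy, gget 0 p (x + dx) (y + dy))])
      refine ⟨(x + dx, y + dy) :: w, by rw [hw1, List.append_assoc]; rfl,
        by rw [hw2, List.append_assoc]; rfl, fun hwnil => absurd hwnil (by simp)⟩

theorem bfsLoop_extend (n l r : Int) (p : List (List Int))
    (q : List (Int × Int)) (v : List (List Bool)) (u : List (Int × Int × Int)) :
    ∃ w, (bfsLoop n l r p q v u).2 = u ++ w := by
  induction q, v, u using bfsLoop.induct n l r p with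
  | case1 v u => exact ⟨[], by simp [bfsLoop]⟩
  | case2 x y rest v u tt ih =>
    rw [show tt = scanDirs n l r p x y dirsL v [] u from rfl] at ih
    simp only [bfsLoop]
    obtain ⟨w2, hw2⟩ := ih
    obtain ⟨w, _, hu, _⟩ := scanDirs_basic n l r p x y dirsL v [] u
    exact ⟨w.map (fun c => (c.1, c.2, gget 0 p c.1 c.2)) ++ w2,
      by rw [hw2, hu, List.append_assoc]⟩

theorem bfsLoop_single (n l r : Int) (p : List (List Int))
    (x y : Int) (v : List (List Bool)) (u : List (Int × Int × Int))
    (h : (bfsLoop n l r p [(x, y)] v u).2 = u) :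
    (bfsLoop n l r p [(x, y)] v u).1 = v ∧
    ∀ d ∈ dirsL, ¬ inG n (x + d.1, y + d.2) ∨ gget true v (x + d.1) (y + d.2) = true ∨
      ¬(l ≤ |gget 0 p (x + d.1) (y + d.2) - gget 0 p x y| ∧
        |gget 0 p (x + d.1) (y + d.2) - gget 0 p x y| ≤ r) := by
  obtain ⟨w, hw1, hw2, hw4⟩ := scanDirs_basic n l r p x y dirsL v [] u
  obtain ⟨w2, hext⟩ := bfsLoop_extend n l r p
    ([] ++ (scanDirs n l r p x y dirsL v [] u).2.1)
    (scanDirs n l r p x y dirsL v [] u).1 (scanDirs n l r p x y dirsL v [] u).2.2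
  have hstep : bfsLoop n l r p [(x, y)] v u =
      bfsLoop n l r p ([] ++ (scanDirs n l r p x y dirsL v [] u).2.1)
        (scanDirs n l r p x y dirsL v [] u).1 (scanDirs n l r p x y dirsL v [] u).2.2 := by
    simp only [bfsLoop]
  rw [hstep] at h ⊢
  rw [hext, hw2, List.append_assoc] at h
  have hwnil : w = [] := by
    have := congrArg List.length h
    simp only [List.length_append, List.length_map] at this
    have : w.length = 0 := by omega
    exact List.length_eq_zero_iff.mp this
  obtain ⟨hv, hsk⟩ := hw4 hwnil
  subst hwnil
  simp only [List.nil_append] at hw1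
  rw [hw1] at hext ⊢
  constructor
  · simp only [List.map_nil, List.append_nil] at hw2
    rw [show ([] : List (Int × Int)) ++ [] = ([] : List (Int × Int)) from rfl]
    simp only [bfsLoop]
    exact hv
  · exact hsk

-- ---- the outer-loop invariant ----

def INV (n l r : Int) (p0 : List (List Int)) (v0 : List (List Bool))
    (st : List (List Bool) × List (List Int) × Bool) : Prop :=
  Sh n st.1 ∧ Sh n st.2.1 ∧
  (∀ c : Int × Int, inG n c → gget true v0 c.1 c.2 = true → gget true st.1 c.1 c.2 = true) ∧
  (∀ c : Int × Int, inG n c → gget true st.1 c.1 c.2 = false →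
      gget 0 st.2.1 c.1 c.2 = gget 0 p0 c.1 c.2) ∧
  (st.2.2 = true → EX n l r p0 v0) ∧
  (st.2.2 = false → ∀ a b : Int × Int, Ed n l r p0 v0 a b → gget true st.1 a.1 a.2 = false)

theorem gset_true_mono (v : List (List Bool)) (cx cy : Int) (hcx : 0 ≤ cx) (hcy : 0 ≤ cy)
    (hvc : gget true v cx cy = false)
    (a b : Int) (ha : 0 ≤ a) (hb : 0 ≤ b) (h : gget true v a b = true) :
    gget true (gset v cx cy true) a b = true := by
  by_cases hc : a = cx ∧ b = cy
  · obtain ⟨rfl, rfl⟩ := hc; rw [hvc] at h; exact absurd h (by simp)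
  · rw [gget_gset_ne true v cx cy a b true hcx hcy ha hb hc]; exact h

theorem gset_down (v : List (List Bool)) (cx cy : Int) (hcx : 0 ≤ cx) (hcy : 0 ≤ cy)
    (a b : Int) (ha : 0 ≤ a) (hb : 0 ≤ b) (hne : ¬(a = cx ∧ b = cy))
    (h : gget true (gset v cx cy true) a b = false) : gget true v a b = false := by
  rw [gget_gset_ne true v cx cy a b true hcx hcy ha hb hne] at h; exact h

theorem fold_gset_Sh (n : Int) (m : Int) (es : List (Int × Int × Int)) (p : List (List Int))
    (hSh : Sh n p) (hes : ∀ e ∈ es, 0 ≤ e.1 ∧ 0 ≤ e.2.1) :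
    Sh n (es.foldl (fun pp e => gset pp e.1 e.2.1 m) p) := by
  induction es generalizing p with
  | nil => exact hSh
  | cons e es ih =>
    simp only [List.foldl_cons]
    have he := hes e List.mem_cons_self
    exact ih (gset p e.1 e.2.1 m) (Sh_gset n p _ _ m he.1 he.2 hSh)
      (fun e' he' => hes e' (List.mem_cons_of_mem _ he'))

theorem fold_gset_ne (m : Int) (es : List (Int × Int × Int)) (p : List (List Int))
    (a b : Int) (ha : 0 ≤ a) (hb : 0 ≤ b)
    (hes : ∀ e ∈ es, 0 ≤ e.1 ∧ 0 ≤ e.2.1 ∧ ¬(a = e.1 ∧ b = e.2.1)) :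
    gget 0 (es.foldl (fun pp e => gset pp e.1 e.2.1 m) p) a b = gget 0 p a b := by
  induction es generalizing p with
  | nil => rfl
  | cons e es ih =>
    simp only [List.foldl_cons]
    have he := hes e List.mem_cons_self
    rw [ih (gset p e.1 e.2.1 m) (fun e' he' => hes e' (List.mem_cons_of_mem _ he')),
      gget_gset_ne 0 p e.1 e.2.1 a b m he.1 he.2.1 ha hb he.2.2]

theorem processCell_master (n l r : Int) (p0 : List (List Int)) (v0 : List (List Bool))
    (st : List (List Bool) × List (List Int) × Bool) (c : Int × Int)
    (hinv : INV n l r p0 v0 st) (hc : inG n c) :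
    INV n l r p0 v0 (processCell n l r st c.1 c.2) ∧
    gget true (processCell n l r st c.1 c.2).1 c.1 c.2 = true ∧
    (∀ a b : Int, 0 ≤ a → 0 ≤ b → gget true st.1 a b = true →
        gget true (processCell n l r st c.1 c.2).1 a b = true) := by
  obtain ⟨hSh, hShp, hmono0, hagree, hfwd, hbwd⟩ := hinv
  simp only [processCell]
  by_cases hvis : gget true st.1 c.1 c.2 = true
  · rw [if_pos hvis]
    exact ⟨⟨hSh, hShp, hmono0, hagree, hfwd, hbwd⟩, hvis, fun a b _ _ h => h⟩
  rw [if_neg hvis]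
  have hvfalse : gget true st.1 c.1 c.2 = false := Bool.eq_false_iff.mpr hvis
  have hc1 : (0:Int) ≤ c.1 := hc.1
  have hc2 : (0:Int) ≤ c.2 := hc.2.2.1
  set v1 := gset st.1 c.1 c.2 true with hv1
  have hSh1 : Sh n v1 := Sh_gset n st.1 _ _ true hc1 hc2 hSh
  have hsame : gget true v1 c.1 c.2 = true := gget_gset_same' true n st.1 c true hSh hc
  have hmono1 : ∀ a b : Int, 0 ≤ a → 0 ≤ b → gget true st.1 a b = true →
      gget true v1 a b = true := gset_true_mono st.1 c.1 c.2 hc1 hc2 hvfalse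
  have hmono0' : ∀ c' : Int × Int, inG n c' → gget true v0 c'.1 c'.2 = true →
      gget true v1 c'.1 c'.2 = true :=
    fun c' hc' h => hmono1 c'.1 c'.2 hc'.1 hc'.2.2.1 (hmono0 c' hc' h)
  have hagree1 : ∀ c' : Int × Int, inG n c' → gget true v1 c'.1 c'.2 = false →
      gget 0 st.2.1 c'.1 c'.2 = gget 0 p0 c'.1 c'.2 := by
    intro c' hc' h
    by_cases hcc : c'.1 = c.1 ∧ c'.2 = c.2
    · rw [show c' = c from Prod.ext hcc.1 hcc.2] at h ⊢
      rw [hsame] at h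
      exact absurd h (by simp)
    · exact hagree c' hc' (gset_down st.1 c.1 c.2 hc1 hc2 c'.1 c'.2 hc'.1 hc'.2.2.1 hcc h)
  have hv00 : gget true v0 c.1 c.2 = false := by
    cases hb : gget true v0 c.1 c.2
    · rfl
    · rw [hmono0 c hc hb] at hvfalse; exact absurd hvfalse (by simp)
  have hp0c : gget 0 st.2.1 c.1 c.2 = gget 0 p0 c.1 c.2 := hagree c hc hvfalse
  have hu0 : ∀ e ∈ [(c.1, c.2, gget 0 st.2.1 c.1 c.2)], UG n st.2.1 p0 v0 v1 e := by
    intro e he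
    rw [List.mem_singleton] at he
    subst he
    exact ⟨hc, hv00, hp0c, hp0c, hsame⟩
  have hq0 : ∀ c' ∈ [(c.1, c.2)], ∃ pv, (c'.1, c'.2, pv) ∈ [(c.1, c.2, gget 0 st.2.1 c.1 c.2)] := by
    intro c' hc'
    rw [List.mem_singleton] at hc'
    subst hc'
    exact ⟨gget 0 st.2.1 c.1 c.2, List.mem_singleton.mpr rfl⟩
  have hlen0 : 2 ≤ ([(c.1, c.2, gget 0 st.2.1 c.1 c.2)] : List (Int × Int × Int)).length →
      EX n l r p0 v0 := by intro h; simp at h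
  obtain ⟨B1, B2, ⟨w, hw⟩, B4, B5, B6⟩ := bfsLoop_master n l r st.2.1 p0 v0
    [(c.1, c.2)] v1 [(c.1, c.2, gget 0 st.2.1 c.1 c.2)]
    hSh1 hmono0' hagree1 hu0 hq0 hlen0
  set t := bfsLoop n l r st.2.1 [(c.1, c.2)] v1 [(c.1, c.2, gget 0 st.2.1 c.1 c.2)] with ht
  have hmonoT : ∀ a b : Int, 0 ≤ a → 0 ≤ b → gget true st.1 a b = true →
      gget true t.1 a b = true := fun a b ha hb h => B2 a b ha hb (hmono1 a b ha hb h)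
  have hvisT : gget true t.1 c.1 c.2 = true := B2 c.1 c.2 hc1 hc2 hsame
  by_cases hL : 2 ≤ t.2.length
  · rw [if_pos hL]
    have hEX : EX n l r p0 v0 := B6 hL
    refine ⟨⟨B1, ?_, ?_, ?_, fun _ => hEX, by simp⟩, hvisT, hmonoT⟩
    · exact fold_gset_Sh n _ t.2 st.2.1 hShp
        (fun e he => ⟨(B4 e he).1.1, (B4 e he).1.2.2.1⟩)
    · exact fun c' hc' h => B2 c'.1 c'.2 hc'.1 hc'.2.2.1 (hmono0' c' hc' h)
    · intro c' hc' h
      simp only at h ⊢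
      rw [fold_gset_ne _ t.2 st.2.1 c'.1 c'.2 hc'.1 hc'.2.2.1]
      · exact B5 c' hc' h
      · intro e he
        obtain ⟨g1, _, _, _, g5⟩ := B4 e he
        refine ⟨g1.1, g1.2.2.1, fun hcc => ?_⟩
        rw [hcc.1, hcc.2] at h
        rw [g5] at h
        exact absurd h (by simp)
  · rw [if_neg hL]
    have hwnil : w = [] := by
      have := congrArg List.length hw
      simp only [List.length_append, List.length_singleton] at this
      have : w.length = 0 := by omega
      exact List.length_eq_zero_iff.mp this
    subst hwnil
    rw [List.append_nil] at hw
    obtain ⟨hteq, hsk⟩ := bfsLoop_single n l r st.2.1 c.1 c.2 v1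
      [(c.1, c.2, gget 0 st.2.1 c.1 c.2)] hw
    rw [← ht] at hteq
    refine ⟨⟨B1, hShp, ?_, B5, hfwd, ?_⟩, hvisT, hmonoT⟩
    · exact fun c' hc' h => B2 c'.1 c'.2 hc'.1 hc'.2.2.1 (hmono0' c' hc' h)
    · intro hchk a b hEd
      simp only at hchk
      have hbwd' := hbwd hchk
      rw [hteq]
      by_cases hac : a.1 = c.1 ∧ a.2 = c.2
      · exfalso
        have hae : a = c := Prod.ext hac.1 hac.2
        subst hae
        have hdmem := hEd.2.2.1
        have hbne : ¬(b.1 = a.1 ∧ b.2 = a.2) := by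
          simp only [dirsL, List.mem_cons, List.not_mem_nil, or_false, Prod.ext_iff] at hdmem
          omega
        have hbst : gget true st.1 b.1 b.2 = false := hbwd' b a (Ed_symm n l r p0 v0 a b hEd)
        have hbv1 : gget true v1 b.1 b.2 = false := by
          rw [gget_gset_ne true st.1 a.1 a.2 b.1 b.2 true hc1 hc2 hEd.2.1.1 hEd.2.1.2.2.1 hbne]
          exact hbst
        have := hsk (b.1 - a.1, b.2 - a.2) hdmem
        have he1 : a.1 + (b.1 - a.1) = b.1 := by ring
        have he2 : a.2 + (b.2 - a.2) = b.2 := by ring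
        rw [he1, he2] at this
        rcases this with hng | hvt | hnb
        · exact hng hEd.2.1
        · rw [hbv1] at hvt; exact absurd hvt (by simp)
        · apply hnb
          have hpb : gget 0 st.2.1 b.1 b.2 = gget 0 p0 b.1 b.2 := hagree b hEd.2.1 hbst
          rw [hpb, hp0c]
          exact ⟨hEd.2.2.2.2.2.1, hEd.2.2.2.2.2.2⟩
      · rw [gget_gset_ne true st.1 c.1 c.2 a.1 a.2 true hc1 hc2 hEd.1.1 hEd.1.2.2.1 hac]
        exact hbwd' a b hEd

theorem fold_master (n l r : Int) (p0 : List (List Int)) (v0 : List (List Bool))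
    (cells : List (Int × Int)) (st : List (List Bool) × List (List Int) × Bool)
    (hinv : INV n l r p0 v0 st) (hcells : ∀ c ∈ cells, inG n c) :
    INV n l r p0 v0 (cells.foldl (fun s c => processCell n l r s c.1 c.2) st) ∧
    (∀ c ∈ cells, gget true (cells.foldl (fun s c => processCell n l r s c.1 c.2) st).1 c.1 c.2 = true) := by
  induction cells generalizing st with
  | nil => exact ⟨hinv, by simp⟩
  | cons c cs ih =>
    have hcin := hcells c List.mem_cons_self
    obtain ⟨hinv', hvis', hmono'⟩ := processCell_master n l r p0 v0 st c hinv hcin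
    obtain ⟨I1, I2⟩ := ih (processCell n l r st c.1 c.2) hinv'
      (fun c' hc' => hcells c' (List.mem_cons_of_mem _ hc'))
    refine ⟨I1, fun c' hc' => ?_⟩
    rcases List.mem_cons.mp hc' with rfl | hmem
    · -- c stays visited through the rest of the fold
      have hmonoAll : ∀ (cs : List (Int × Int)) (s : List (List Bool) × List (List Int) × Bool),
          INV n l r p0 v0 s → (∀ c' ∈ cs, inG n c') →
          ∀ a b : Int, 0 ≤ a → 0 ≤ b → gget true s.1 a b = true →
          gget true ((cs.foldl (fun s c => processCell n l r s c.1 c.2) s)).1 a b = true := by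
        intro cs
        induction cs with
        | nil => intro s _ _ a b _ _ h; exact h
        | cons d ds ih2 =>
          intro s hs hds a b ha hb h
          obtain ⟨hinv2, _, hmono2⟩ := processCell_master n l r p0 v0 s d hs
            (hds d List.mem_cons_self)
          exact ih2 (processCell n l r s d.1 d.2) hinv2
            (fun c'' hc'' => hds c'' (List.mem_cons_of_mem _ hc'')) a b ha hb
            (hmono2 a b ha hb h)
      simp only [List.foldl_cons]
      exact hmonoAll cs (processCell n l r st c'.1 c'.2) hinv'
        (fun c'' hc'' => hcells c'' (List.mem_cons_of_mem _ hc''))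
        c'.1 c'.2 hcin.1 hcin.2.2.1 hvis'
    · exact I2 c' hmem

-- bfs's nested loops, flattened to a single fold over all grid cells
theorem bfs_eq_fold (n l r : Int) (p0 : List (List Int)) (v0 : List (List Bool)) :
    bfs n l r p0 v0 =
      (if (((PySem.List.pyRange 0 n 1).flatMap fun i =>
              (PySem.List.pyRange 0 n 1).map fun j => ((i : Int), (j : Int))).foldl
            (fun s c => processCell n l r s c.1 c.2) (v0, p0, false)).2.2 then 1 else 0) := by
  unfold bfs
  rw [List.foldl_flatMap]
  simp only [List.foldl_map]

-- A returns 1 exactly on EX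
theorem bfs_iff (n l r : Int) (p0 : List (List Int)) (v0 : List (List Bool))
    (hp : Sh n p0) (hv : Sh n v0) :
    (EX n l r p0 v0 → bfs n l r p0 v0 = 1) ∧ (¬ EX n l r p0 v0 → bfs n l r p0 v0 = 0) := by
  set cells := ((PySem.List.pyRange 0 n 1).flatMap fun i =>
    (PySem.List.pyRange 0 n 1).map fun j => ((i : Int), (j : Int))) with hcellsdef
  have hmemcells : ∀ c : Int × Int, inG n c → c ∈ cells := by
    intro c hc
    rw [hcellsdef]
    refine List.mem_flatMap.mpr ⟨c.1, (mem_pyRange01 n c.1).mpr ⟨hc.1, hc.2.1⟩, ?_⟩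
    exact List.mem_map.mpr ⟨c.2, (mem_pyRange01 n c.2).mpr ⟨hc.2.2.1, hc.2.2.2⟩, rfl⟩
  have hcells : ∀ c ∈ cells, inG n c := by
    intro c hc
    rw [hcellsdef] at hc
    obtain ⟨i, hi, hc⟩ := List.mem_flatMap.mp hc
    obtain ⟨j, hj, rfl⟩ := List.mem_map.mp hc
    rw [mem_pyRange01] at hi hj
    exact ⟨hi.1, hi.2, hj.1, hj.2⟩
  have hinv0 : INV n l r p0 v0 (v0, p0, false) := by
    refine ⟨hv, hp, fun c _ h => h, fun c _ _ => rfl, by simp, ?_⟩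
    intro _ a b hEd
    exact hEd.2.2.2.1
  obtain ⟨hinvF, hvisF⟩ := fold_master n l r p0 v0 cells (v0, p0, false) hinv0 hcells
  set stf := cells.foldl (fun s c => processCell n l r s c.1 c.2) (v0, p0, false) with hstf
  have hbfs : bfs n l r p0 v0 = if stf.2.2 then 1 else 0 := bfs_eq_fold n l r p0 v0
  obtain ⟨F1, F2, F3, F4, F5, F6⟩ := hinvF
  constructor
  · intro hEX
    rw [hbfs]
    cases hchk : stf.2.2
    · exfalso
      obtain ⟨a, b, hEd⟩ := hEX
      have hfalse := F6 hchk a b hEd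
      have htrue := hvisF a (hmemcells a hEd.1)
      rw [htrue] at hfalse
      exact absurd hfalse (by simp)
    · simp
  · intro hEX
    rw [hbfs]
    cases hchk : stf.2.2
    · simp
    · exact absurd (F5 hchk) hEX

-- B returns 1 exactly on EX
theorem bfs_alt_iff (n l r : Int) (p0 : List (List Int)) (v0 : List (List Bool)) :
    (EX n l r p0 v0 → bfs_alt n l r p0 v0 = 1) ∧ (¬ EX n l r p0 v0 → bfs_alt n l r p0 v0 = 0) := by
  have key : ((PySem.List.pyRange 0 n 1).any fun i =>
      (PySem.List.pyRange 0 n 1).any fun j =>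
        (([((i + 1 : Int), j), (i, (j + 1 : Int))].filter fun c => decide (c.1 < n ∧ c.2 < n)).any
          fun c =>
            !gget true v0 i j && !gget true v0 c.1 c.2 &&
              decide (l ≤ |gget 0 p0 i j - gget 0 p0 c.1 c.2| ∧
                |gget 0 p0 i j - gget 0 p0 c.1 c.2| ≤ r))) = true ↔ EX n l r p0 v0 := by
    simp only [List.any_eq_true, mem_pyRange01, List.mem_filter, Bool.and_eq_true,
      decide_eq_true_eq, Bool.not_eq_eq_eq_not, Bool.not_true, List.mem_cons,
      List.not_mem_nil, or_false, List.mem_singleton]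
    constructor
    · rintro ⟨i, hi, j, hj, c, ⟨hcmem, hclt⟩, ⟨hvi, hvc⟩, hb1, hb2⟩
      rcases hcmem with rfl | rfl
      · exact ⟨(i, j), (i + 1, j), ⟨hi.1, hi.2, hj.1, hj.2⟩,
          ⟨by omega, hclt.1, hj.1, hclt.2⟩, by simp [dirsL], hvi, hvc,
          by rw [abs_sub_comm]; exact hb1, by rw [abs_sub_comm]; exact hb2⟩
      · exact ⟨(i, j), (i, j + 1), ⟨hi.1, hi.2, hj.1, hj.2⟩,
          ⟨hi.1, hclt.1, by omega, hclt.2⟩, by simp [dirsL], hvi, hvc,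
          by rw [abs_sub_comm]; exact hb1, by rw [abs_sub_comm]; exact hb2⟩
    · rintro ⟨a, b, ha, hb, hd, hva, hvb, hb1, hb2⟩
      obtain ⟨ha1, ha2, ha3, ha4⟩ := ha
      obtain ⟨hg1, hg2, hg3, hg4⟩ := hb
      simp only [dirsL, List.mem_cons, List.not_mem_nil, or_false, Prod.ext_iff] at hd
      rcases hd with ⟨h1, h2⟩ | ⟨h1, h2⟩ | ⟨h1, h2⟩ | ⟨h1, h2⟩
      · -- b = a + (1,0): take (i,j) = a, first candidate
        refine ⟨a.1, ⟨ha1, ha2⟩, a.2, ⟨ha3, ha4⟩, (a.1 + 1, a.2),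
          ⟨Or.inl rfl, ?_, ?_⟩, ⟨hva, ?_⟩, ?_, ?_⟩
        · simp only; omega
        · simp only; omega
        · have : (a.1 + 1, a.2) = b := by rw [Prod.ext_iff]; constructor <;> simp <;> omega
          rw [this]; exact hvb
        · have : (a.1 + 1, a.2) = b := by rw [Prod.ext_iff]; constructor <;> simp <;> omega
          rw [this, abs_sub_comm]; exact hb1
        · have : (a.1 + 1, a.2) = b := by rw [Prod.ext_iff]; constructor <;> simp <;> omega
          rw [this, abs_sub_comm]; exact hb2
      · -- b = a + (-1,0): take (i,j) = b, first candidate = a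
        refine ⟨b.1, ⟨hg1, hg2⟩, b.2, ⟨hg3, hg4⟩, (b.1 + 1, b.2),
          ⟨Or.inl rfl, ?_, ?_⟩, ⟨hvb, ?_⟩, ?_, ?_⟩
        · simp only; omega
        · simp only; omega
        · have : (b.1 + 1, b.2) = a := by rw [Prod.ext_iff]; constructor <;> simp <;> omega
          rw [this]; exact hva
        · have : (b.1 + 1, b.2) = a := by rw [Prod.ext_iff]; constructor <;> simp <;> omega
          rw [this]; exact hb1
        · have : (b.1 + 1, b.2) = a := by rw [Prod.ext_iff]; constructor <;> simp <;> omega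
          rw [this]; exact hb2
      · -- b = a + (0,1): take (i,j) = a, second candidate
        refine ⟨a.1, ⟨ha1, ha2⟩, a.2, ⟨ha3, ha4⟩, (a.1, a.2 + 1),
          ⟨Or.inr rfl, ?_, ?_⟩, ⟨hva, ?_⟩, ?_, ?_⟩
        · simp only; omega
        · simp only; omega
        · have : (a.1, a.2 + 1) = b := by rw [Prod.ext_iff]; constructor <;> simp <;> omega
          rw [this]; exact hvb
        · have : (a.1, a.2 + 1) = b := by rw [Prod.ext_iff]; constructor <;> simp <;> omega
          rw [this, abs_sub_comm]; exact hb1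
        · have : (a.1, a.2 + 1) = b := by rw [Prod.ext_iff]; constructor <;> simp <;> omega
          rw [this, abs_sub_comm]; exact hb2
      · -- b = a + (0,-1): take (i,j) = b, second candidate = a
        refine ⟨b.1, ⟨hg1, hg2⟩, b.2, ⟨hg3, hg4⟩, (b.1, b.2 + 1),
          ⟨Or.inr rfl, ?_, ?_⟩, ⟨hvb, ?_⟩, ?_, ?_⟩
        · simp only; omega
        · simp only; omega
        · have : (b.1, b.2 + 1) = a := by rw [Prod.ext_iff]; constructor <;> simp <;> omega
          rw [this]; exact hva
        · have : (b.1, b.2 + 1) = a := by rw [Prod.ext_iff]; constructor <;> simp <;> omega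
          rw [this]; exact hb1
        · have : (b.1, b.2 + 1) = a := by rw [Prod.ext_iff]; constructor <;> simp <;> omega
          rw [this]; exact hb2
  unfold bfs_alt
  constructor
  · intro hEX
    rw [if_pos (key.mpr hEX)]
  · intro hEX
    rw [if_neg (fun h => hEX (key.mp h))]

theorem Pre_Sh {α : Type} (n : Int) (g : List (List α))
    (h1 : n ≤ (g.length : Int)) (h2 : ∀ row ∈ g.take n.toNat, n ≤ (row.length : Int)) :
    Sh n g := by
  refine ⟨h1, fun k hk => ?_⟩
  have hkn : k < n.toNat := by omega
  have hklen : k < g.length := by omega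
  have hmem : g.getD k [] ∈ g.take n.toNat := by
    rw [List.getD_eq_getElem?_getD, List.getElem?_eq_getElem hklen]
    simp only [Option.getD_some]
    exact List.mem_take_iff_getElem.mpr ⟨k, by omega, by simp⟩
  exact h2 _ hmem
theorem bfs_spec : Claim_equal_bfs := by
  intro n l r population visited _ hpre
  obtain ⟨h1, h2, h3, h4⟩ := hpre
  unfold Spec_bfs
  have hA := bfs_iff n l r population visited (Pre_Sh n population h1 h2) (Pre_Sh n visited h3 h4)
  have hB := bfs_alt_iff n l r population visited
  by_cases hEX : EX n l r population visited
  · rw [hA.1 hEX, hB.1 hEX]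
  · rw [hA.2 hEX, hB.2 hEX]
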